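-- pv_equiv track=rewrite | github.com/TeeKay-FourTwentyOne/math | ramsey-book-graphs/verify_equi_covariance.py | brute_force_collision_counts_term9
-- ===== SOURCE A (Python) =====
-- from collections import defaultdict
--
-- def brute_force_collision_counts_term9(p, d1, d2):
--     """Count (a,b) pairs in Term 9 by number of distinct indices, via brute force."""
--     counts = defaultdict(int)
--     for a in range(1, p):
--         if a == d1:
--             continue
--         ad1 = (a - d1) % p
--         for b in range(1, p):
--             if b == d2:
--                 continue
--             bd2 = (b - d2) % p
--             nd = len({a, ad1, b, bd2})
--             counts[nd] += 1
--     return dict(counts)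
-- ===== SOURCE B (Python) =====
-- def brute_force_collision_counts_term9(p, d1, d2):
--     """Count (a,b) pairs in Term 9 by number of distinct indices, in O(p).
--
--     For a fixed a, only b in {a, ad1, (a+d2)%p, (ad1+d2)%p} can share an index
--     with {a, ad1}; every other b contributes the same key.  So the scan over b
--     is compressed into runs: walk the few stop values in increasing order and
--     account for each whole run between them at once."""
--     counts = {}
--     for a in range(1, p):
--         if a == d1:
--             continue
--         ad1 = (a - d1) % p
--         base = len({a, ad1}) + (1 if d2 % p == 0 else 2)
--         stops = sorted(x for x in {a, ad1, (a + d2) % p, (ad1 + d2) % p, d2}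
--                        if 1 <= x < p)
--         prev = 0
--         for e in stops + [p]:
--             run = e - prev - 1
--             if run > 0:
--                 counts[base] = counts.get(base, 0) + run
--             if e < p and e != d2:
--                 nd = len({a, ad1, e, (e - d2) % p})
--                 counts[nd] = counts.get(nd, 0) + 1
--             prev = e
--     return counts
-- ===== Notes on version B (the rewrite author's own statement) =====
-- stated objective: faster
-- what changed: A scans all (a,b) pairs in a double loop; B keeps the outer loop over a but compresses the inner scan over b into runs: only the at most four stop values {a, ad1, (a+d2)%p, (ad1+d2)%p} can share an index with {a, ad1}, so each maximal run of ordinary b between consecutive stops is accounted for in one weighted dictionary update.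
import Mathlib
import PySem

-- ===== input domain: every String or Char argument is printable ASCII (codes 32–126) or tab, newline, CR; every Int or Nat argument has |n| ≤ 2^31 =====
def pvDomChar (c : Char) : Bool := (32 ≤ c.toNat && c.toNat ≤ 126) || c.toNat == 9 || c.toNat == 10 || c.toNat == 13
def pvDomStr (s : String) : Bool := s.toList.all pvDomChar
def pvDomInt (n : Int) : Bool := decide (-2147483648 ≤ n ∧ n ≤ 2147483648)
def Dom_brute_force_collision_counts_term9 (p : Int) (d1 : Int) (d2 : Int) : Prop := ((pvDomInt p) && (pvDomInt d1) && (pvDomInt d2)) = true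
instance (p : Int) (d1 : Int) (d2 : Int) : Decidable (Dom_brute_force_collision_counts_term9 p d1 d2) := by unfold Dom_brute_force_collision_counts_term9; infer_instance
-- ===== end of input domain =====

-- B replaces A's O(p^2) double loop by an O(p) sweep: for each a, the inner scan over b
-- is run-length compressed between the at most four b-values that can overlap {a, ad1}.

-- ===== PORT A =====
def brute_force_collision_counts_term9 (p : Int) (d1 : Int) (d2 : Int) : List (Int × Int) :=
  ((PySem.List.pyRange 1 p 1).foldl (fun counts a =>
      if a = d1 then counts
      else
        let ad1 := PySem.Int.mod (a - d1) p
        (PySem.List.pyRange 1 p 1).foldl (fun counts b =>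
            if b = d2 then counts
            else
              let bd2 := PySem.Int.mod (b - d2) p
              let nd : Int := ((PySem.Set.ofList [a, ad1, b, bd2]).length : Int)
              counts.modify nd 0 (· + 1))
          counts)
    (PySem.Dict.empty : PySem.Dict Int Int)).items

-- ===== PORT B =====
def brute_force_collision_counts_term9_alt (p : Int) (d1 : Int) (d2 : Int) : List (Int × Int) :=
  ((PySem.List.pyRange 1 p 1).foldl (fun counts a =>
      if a = d1 then counts
      else
        let ad1 := PySem.Int.mod (a - d1) p
        let base : Int := ((PySem.Set.ofList [a, ad1]).length : Int) +
          (if PySem.Int.mod d2 p = 0 then 1 else 2)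
        let stops := PySem.List.sorted
          ((PySem.Set.ofList [a, ad1, PySem.Int.mod (a + d2) p,
              PySem.Int.mod (ad1 + d2) p, d2]).filter
            (fun x => decide (1 ≤ x) && decide (x < p)))
          (fun x => x) false
        ((stops ++ [p]).foldl (fun (st : PySem.Dict Int Int × Int) e =>
            let run := e - st.2 - 1
            let c1 := if 0 < run then st.1.insert base (st.1.getD base 0 + run) else st.1
            let c2 := if e < p ∧ e ≠ d2 then
                let nd : Int := ((PySem.Set.ofList [a, ad1, e, PySem.Int.mod (e - d2) p]).length : Int)
                c1.insert nd (c1.getD nd 0 + 1)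
              else c1
            (c2, e))
          (counts, 0)).1)
    (PySem.Dict.empty : PySem.Dict Int Int)).items

-- ===== PRECONDITION & SPEC =====
def Spec_brute_force_collision_counts_term9 (p : Int) (d1 : Int) (d2 : Int) (out : List (Int × Int)) : Prop := out = brute_force_collision_counts_term9_alt p d1 d2
instance (p : Int) (d1 : Int) (d2 : Int) (out : List (Int × Int)) : Decidable (Spec_brute_force_collision_counts_term9 p d1 d2 out) := by unfold Spec_brute_force_collision_counts_term9; infer_instance

-- ===== CLAIM (what is proved, stated in full; the proofs are below) =====
def Claim_equal_brute_force_collision_counts_term9 : Prop := ∀ (p : Int) (d1 : Int) (d2 : Int), Dom_brute_force_collision_counts_term9 p d1 d2 → Spec_brute_force_collision_counts_term9 p d1 d2 (brute_force_collision_counts_term9 p d1 d2)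

-- ===== LEMMAS AND PROOFS =====

-- the key A assigns to a pair (a, b)
def pvG (p d1 d2 a b : Int) : Int :=
  ((PySem.Set.ofList [a, PySem.Int.mod (a - d1) p, b, PySem.Int.mod (b - d2) p]).length : Int)

-- the common key of every b that overlaps nothing
def pvBase (p d1 d2 a : Int) : Int :=
  ((PySem.Set.ofList [a, PySem.Int.mod (a - d1) p]).length : Int) +
    (if PySem.Int.mod d2 p = 0 then 1 else 2)

def pvStops (p d1 d2 a : Int) : List Int :=
  PySem.List.sorted
    ((PySem.Set.ofList [a, PySem.Int.mod (a - d1) p, PySem.Int.mod (a + d2) p,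
        PySem.Int.mod (PySem.Int.mod (a - d1) p + d2) p, d2]).filter
      (fun x => decide (1 ≤ x) && decide (x < p)))
    (fun x => x) false

def pvStep (p d1 d2 a : Int) (st : PySem.Dict Int Int × Int) (e : Int) : PySem.Dict Int Int × Int :=
  let run := e - st.2 - 1
  let c1 := if 0 < run then st.1.insert (pvBase p d1 d2 a) (st.1.getD (pvBase p d1 d2 a) 0 + run)
            else st.1
  let c2 := if e < p ∧ e ≠ d2 then c1.insert (pvG p d1 d2 a e) (c1.getD (pvG p d1 d2 a e) 0 + 1)
            else c1
  (c2, e)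

def pvIncr (d : PySem.Dict Int Int) (k : Int) : PySem.Dict Int Int := d.modify k 0 (· + 1)

-- the flat sequence of keys B's walk touches, in order
def pvEmit (p d1 d2 a : Int) : Int → List Int → List Int
  | _, [] => []
  | prev, e :: es =>
    List.replicate (e - prev - 1).toNat (pvBase p d1 d2 a)
      ++ (if e < p ∧ e ≠ d2 then [pvG p d1 d2 a e] else [])
      ++ pvEmit p d1 d2 a e es

def pvV (p d2 : Int) : List Int := (PySem.List.pyRange 1 p 1).filter (fun b => !(b == d2))

lemma pv_incrFold_replicate (k : Int) (n : Nat) (hn : 1 ≤ n) :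
    ∀ d : PySem.Dict Int Int,
      (List.replicate n k).foldl pvIncr d = d.insert k (d.getD k 0 + (n : Int)) := by
  induction n with
  | zero => omega
  | succ n ih =>
    intro d
    rcases Nat.eq_or_lt_of_le hn with h1 | h1
    · simp [← h1, pvIncr]
      rfl
    · have hn' : 1 ≤ n := by omega
      rw [List.replicate_succ, List.foldl_cons]
      rw [ih hn' (pvIncr d k)]
      have h2 : pvIncr d k = d.insert k (d.getD k 0 + 1) := rfl
      rw [h2, PySem.Dict.getD_insert_self, PySem.Dict.insert_insert_self]
      congr 1
      push_cast
      ring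

lemma pv_discard_filter (s : PySem.Set Int) (x : Int) :
    PySem.Set.discard s x = s.filter (fun y => !(y == x)) := rfl

lemma pv_filter_ofList (q : Int → Bool) (L : List Int) :
    (PySem.Set.ofList L).filter q = PySem.Set.ofList (L.filter q) := by
  induction L with
  | nil => rfl
  | cons x L ih =>
    rw [PySem.Set.ofList_cons, pv_discard_filter]
    by_cases hx : q x
    · conv_rhs => rw [List.filter_cons_of_pos hx, PySem.Set.ofList_cons, pv_discard_filter, ← ih]
      rw [List.filter_cons_of_pos hx]
      simp only [List.filter_filter]
      congr 1
      apply List.filter_congr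
      intro y _
      rw [Bool.and_comm]
    · conv_rhs => rw [List.filter_cons_of_neg hx, ← ih]
      rw [List.filter_cons_of_neg hx]
      simp only [List.filter_filter]
      apply List.filter_congr
      intro y _
      by_cases hxy : y = x
      · subst hxy; simp [hx]
      · simp [hxy]

lemma pv_dvd_of_mod (p x y : Int) (hp : 0 < p) (hy1 : 0 ≤ y) (hy2 : y < p) :
    PySem.Int.mod x p = y ↔ p ∣ (x - y) := by
  rw [PySem.Int.mod_eq_emod_of_pos (b := p) (a := x) hp]
  have hy : y % p = y := Int.emod_eq_of_lt hy1 hy2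
  constructor
  · intro h
    have hm : x ≡ y [ZMOD p] := by unfold Int.ModEq; rw [h, hy]
    have h2 : p ∣ y - x := Int.ModEq.dvd hm
    have h3 : p ∣ -(y - x) := Int.dvd_neg.mpr h2
    simpa using h3
  · intro h
    have h2 : p ∣ x - y := h
    have hm : y ≡ x [ZMOD p] := Int.modEq_iff_dvd.mpr h2
    have := hm.symm
    unfold Int.ModEq at this
    rw [this, hy]

lemma pv_mod_shift_iff (p d2 b t : Int) (hp : 0 < p) (hb1 : 0 ≤ b) (hb2 : b < p)
    (ht1 : 0 ≤ t) (ht2 : t < p) :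
    PySem.Int.mod (b - d2) p = t ↔ b = PySem.Int.mod (t + d2) p := by
  rw [pv_dvd_of_mod p _ _ hp ht1 ht2]
  rw [show (b = PySem.Int.mod (t + d2) p) ↔ (PySem.Int.mod (t + d2) p = b) from eq_comm]
  rw [pv_dvd_of_mod p _ _ hp hb1 hb2]
  constructor
  · intro h
    have : p ∣ -(b - d2 - t) := Int.dvd_neg.mpr h
    have h2 : -(b - d2 - t) = t + d2 - b := by ring
    rwa [h2] at this
  · intro h
    have : p ∣ -(t + d2 - b) := Int.dvd_neg.mpr h
    have h2 : -(t + d2 - b) = b - d2 - t := by ring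
    rwa [h2] at this

lemma pv_mod_self_iff (p d2 b : Int) (hp : 0 < p) (hb1 : 0 ≤ b) (hb2 : b < p) :
    PySem.Int.mod (b - d2) p = b ↔ PySem.Int.mod d2 p = 0 := by
  rw [pv_dvd_of_mod p _ _ hp hb1 hb2, pv_dvd_of_mod p _ _ hp le_rfl hp]
  constructor
  · intro h
    have : p ∣ -(b - d2 - b) := Int.dvd_neg.mpr h
    have h2 : -(b - d2 - b) = d2 - 0 := by ring
    rwa [h2] at this
  · intro h
    have : p ∣ -(d2 - 0) := Int.dvd_neg.mpr h
    have h2 : -(d2 - 0) = b - d2 - b := by ring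
    rwa [h2] at this

-- b overlaps nothing: A's key for (a, b) is the common key pvBase
lemma pv_g_base (p d1 d2 a b : Int) (hp : 1 < p) (ha1 : 1 ≤ a) (ha2 : a < p)
    (hb1 : 1 ≤ b) (hb2 : b < p)
    (hba : b ≠ a) (hbad1 : b ≠ PySem.Int.mod (a - d1) p)
    (hs1 : b ≠ PySem.Int.mod (a + d2) p)
    (hs2 : b ≠ PySem.Int.mod (PySem.Int.mod (a - d1) p + d2) p) :
    pvG p d1 d2 a b = pvBase p d1 d2 a := by
  have hp0 : 0 < p := by omega
  have had1_lb : 0 ≤ PySem.Int.mod (a - d1) p := PySem.Int.mod_nonneg _ hp0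
  have had1_ub : PySem.Int.mod (a - d1) p < p := PySem.Int.mod_lt _ hp0
  have hbd2a : PySem.Int.mod (b - d2) p ≠ a := by
    intro h
    exact hs1 ((pv_mod_shift_iff p d2 b a hp0 (by omega) hb2 (by omega) ha2).mp h)
  have hbd2ad1 : PySem.Int.mod (b - d2) p ≠ PySem.Int.mod (a - d1) p := by
    intro h
    exact hs2 ((pv_mod_shift_iff p d2 b (PySem.Int.mod (a - d1) p) hp0 (by omega) hb2
      had1_lb had1_ub).mp h)
  have h3 : PySem.Set.ofList [a, PySem.Int.mod (a - d1) p, b, PySem.Int.mod (b - d2) p]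
      = PySem.Set.add (PySem.Set.ofList [a, PySem.Int.mod (a - d1) p, b])
          (PySem.Int.mod (b - d2) p) := by
    rw [show ([a, PySem.Int.mod (a - d1) p, b, PySem.Int.mod (b - d2) p] : List Int)
        = [a, PySem.Int.mod (a - d1) p, b] ++ [PySem.Int.mod (b - d2) p] from rfl,
      PySem.Set.ofList_append_singleton]
  have h4 : PySem.Set.ofList [a, PySem.Int.mod (a - d1) p, b]
      = PySem.Set.ofList [a, PySem.Int.mod (a - d1) p] ++ [b] := by
    rw [show ([a, PySem.Int.mod (a - d1) p, b] : List Int)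
        = [a, PySem.Int.mod (a - d1) p] ++ [b] from rfl,
      PySem.Set.ofList_append_singleton]
    apply PySem.Set.add_of_not_mem
    rw [PySem.Set.mem_ofList]
    simp [hba, hbad1]
  have hmem : PySem.Int.mod (b - d2) p ∈ PySem.Set.ofList [a, PySem.Int.mod (a - d1) p] ++ [b]
      ↔ PySem.Int.mod (b - d2) p = b := by
    simp [PySem.Set.mem_ofList, hbd2a, hbd2ad1]
  unfold pvG pvBase
  rw [h3, h4]
  by_cases hz : PySem.Int.mod d2 p = 0
  · have hbb : PySem.Int.mod (b - d2) p = b :=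
      (pv_mod_self_iff p d2 b hp0 (by omega) hb2).mpr hz
    rw [PySem.Set.add_of_mem (hmem.mpr hbb)]
    simp [hz]
  · have hbb : PySem.Int.mod (b - d2) p ≠ b := by
      intro h
      exact hz ((pv_mod_self_iff p d2 b hp0 (by omega) hb2).mp h)
    rw [PySem.Set.add_of_not_mem (fun h => hbb (hmem.mp h))]
    simp [hz]

lemma pv_mem_stops (p d1 d2 a x : Int) :
    x ∈ pvStops p d1 d2 a ↔
      ((x = a ∨ x = PySem.Int.mod (a - d1) p ∨ x = PySem.Int.mod (a + d2) p ∨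
        x = PySem.Int.mod (PySem.Int.mod (a - d1) p + d2) p ∨ x = d2) ∧ 1 ≤ x ∧ x < p) := by
  unfold pvStops
  rw [PySem.List.mem_sorted, List.mem_filter, PySem.Set.mem_ofList]
  simp

lemma pv_stops_pairwise (p d1 d2 a : Int) : (pvStops p d1 d2 a).Pairwise (· < ·) := by
  unfold pvStops
  rw [pv_filter_ofList]
  exact PySem.List.sorted_ofList_pairwise_lt _

-- B's walk over a stop list, flattened: the dict is the pvIncr-fold of the emitted keys
lemma pv_walk (p d1 d2 a : Int) :
    ∀ (L : List Int) (d : PySem.Dict Int Int) (prev : Int),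
      (L.foldl (pvStep p d1 d2 a) (d, prev)).1
        = (pvEmit p d1 d2 a prev L).foldl pvIncr d := by
  intro L
  induction L with
  | nil => intro d prev; rfl
  | cons e es ih =>
    intro d prev
    have hhead : pvStep p d1 d2 a (d, prev) e
        = ((List.replicate (e - prev - 1).toNat (pvBase p d1 d2 a)
            ++ (if e < p ∧ e ≠ d2 then [pvG p d1 d2 a e] else [])).foldl pvIncr d, e) := by
      simp only [pvStep]
      rw [List.foldl_append]
      by_cases hr : 0 < e - prev - 1
      · rw [if_pos hr, pv_incrFold_replicate _ _ (by omega) d, Int.toNat_of_nonneg (by omega)]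
        by_cases hc : e < p ∧ e ≠ d2
        · rw [if_pos hc, if_pos hc]; rfl
        · rw [if_neg hc, if_neg hc]; rfl
      · rw [if_neg hr]
        have h0 : (e - prev - 1).toNat = 0 := by omega
        rw [h0, List.replicate_zero, List.foldl_nil]
        by_cases hc : e < p ∧ e ≠ d2
        · rw [if_pos hc, if_pos hc]; rfl
        · rw [if_neg hc, if_neg hc]; rfl
    rw [List.foldl_cons, hhead, ih]
    have hsplit : pvEmit p d1 d2 a prev (e :: es)
        = (List.replicate (e - prev - 1).toNat (pvBase p d1 d2 a)
            ++ (if e < p ∧ e ≠ d2 then [pvG p d1 d2 a e] else [])) ++ pvEmit p d1 d2 a e es := by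
      simp [pvEmit, List.append_assoc]
    rw [hsplit]
    simp [List.foldl_append]

-- a run of overlap-free b values contributes the constant key pvBase
lemma pv_run_chunk (p d1 d2 a lo hi : Int)
    (hgen : ∀ b, lo < b → b < hi → b ≠ d2 ∧ pvG p d1 d2 a b = pvBase p d1 d2 a) :
    ((PySem.List.pyRange (lo + 1) hi 1).filter (fun b => !(b == d2))).map (pvG p d1 d2 a)
      = List.replicate (hi - lo - 1).toNat (pvBase p d1 d2 a) := by
  have hf : (PySem.List.pyRange (lo + 1) hi 1).filter (fun b => !(b == d2))
      = PySem.List.pyRange (lo + 1) hi 1 := by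
    apply List.filter_eq_self.mpr
    intro b hb
    rw [PySem.List.mem_pyRange_one] at hb
    simpa using (hgen b (by omega) (by omega)).1
  rw [hf]
  apply List.eq_replicate_iff.mpr
  constructor
  · rw [List.length_map, PySem.List.length_pyRange_one]
    omega
  · intro x hx
    obtain ⟨b, hb, rfl⟩ := List.mem_map.mp hx
    rw [PySem.List.mem_pyRange_one] at hb
    exact (hgen b (by omega) (by omega)).2

-- the emitted key sequence IS A's key sequence over the valid b in increasing order
lemma pv_emit_spec (p d1 d2 a : Int) :
    ∀ (E : List Int) (lo : Int), E.Pairwise (· < ·) →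
      (∀ e ∈ E, lo < e ∧ e < p) →
      (∀ b, lo < b → b < p → b ∉ E → b ≠ d2 ∧ pvG p d1 d2 a b = pvBase p d1 d2 a) →
      pvEmit p d1 d2 a lo (E ++ [p])
        = ((PySem.List.pyRange (lo + 1) p 1).filter (fun b => !(b == d2))).map (pvG p d1 d2 a) := by
  intro E
  induction E with
  | nil =>
    intro lo _ _ hgen
    have hc : ¬ (p < p ∧ p ≠ d2) := by
      rintro ⟨h, _⟩; exact lt_irrefl _ h
    simp only [List.nil_append, pvEmit, if_neg hc, List.append_nil]
    exact (pv_run_chunk p d1 d2 a lo p (fun b h1 h2 => hgen b h1 h2 List.not_mem_nil)).symm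
  | cons e es ih =>
    intro lo hpw helem hgen
    obtain ⟨he1, he2⟩ := helem e List.mem_cons_self
    have hpwes := (List.pairwise_cons.mp hpw).2
    have hlt := (List.pairwise_cons.mp hpw).1
    have hchunk := pv_run_chunk p d1 d2 a lo e (fun b h1 h2 => by
      apply hgen b h1 (by omega)
      intro hb
      rcases List.mem_cons.mp hb with h | h
      · omega
      · have := hlt b h; omega)
    have htail := ih e hpwes
      (fun x hx => ⟨hlt x hx, (helem x (List.mem_cons_of_mem _ hx)).2⟩)
      (fun b h1 h2 hb => hgen b (by omega) h2 (by
        intro hmem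
        rcases List.mem_cons.mp hmem with h | h
        · omega
        · exact hb h))
    rw [PySem.List.pyRange_one_append (lo + 1) e p (by omega) (by omega),
      PySem.List.pyRange_one_cons he2, List.filter_append, List.map_append]
    show List.replicate (e - lo - 1).toNat (pvBase p d1 d2 a)
        ++ (if e < p ∧ e ≠ d2 then [pvG p d1 d2 a e] else []) ++ pvEmit p d1 d2 a e (es ++ [p]) = _
    rw [htail, ← hchunk]
    by_cases hd : e = d2
    · rw [List.filter_cons_of_neg (by simp [hd]), if_neg (by rintro ⟨_, h⟩; exact h hd)]
      simp
    · rw [List.filter_cons_of_pos (by simp [hd]), if_pos ⟨he2, hd⟩]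
      simp

lemma pv_emit_main (p d1 d2 a : Int) (hp : 1 < p) (ha1 : 1 ≤ a) (ha2 : a < p) :
    pvEmit p d1 d2 a 0 (pvStops p d1 d2 a ++ [p])
      = (pvV p d2).map (pvG p d1 d2 a) := by
  have h := pv_emit_spec p d1 d2 a (pvStops p d1 d2 a) 0
    (pv_stops_pairwise p d1 d2 a)
    (fun e he => by
      obtain ⟨_, h1, h2⟩ := (pv_mem_stops p d1 d2 a e).mp he
      exact ⟨by omega, h2⟩)
    (fun b h1 h2 hb => by
      rw [pv_mem_stops] at hb
      have hnb : ¬ (b = a ∨ b = PySem.Int.mod (a - d1) p ∨ b = PySem.Int.mod (a + d2) p ∨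
          b = PySem.Int.mod (PySem.Int.mod (a - d1) p + d2) p ∨ b = d2) :=
        fun hd => hb ⟨hd, by omega, h2⟩
      push Not at hnb
      obtain ⟨hba, hbad1, hs1, hs2, hbd2⟩ := hnb
      exact ⟨hbd2, pv_g_base p d1 d2 a b hp ha1 ha2 (by omega) h2 hba hbad1 hs1 hs2⟩)
  rw [h]
  unfold pvV
  rw [show (0 : Int) + 1 = 1 from by norm_num]

lemma pv_stepA_shape (p d1 d2 a : Int) (d : PySem.Dict Int Int) :
    (PySem.List.pyRange 1 p 1).foldl
        (fun counts b => if b = d2 then counts else counts.modify (pvG p d1 d2 a b) 0 (· + 1)) d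
      = ((pvV p d2).map (pvG p d1 d2 a)).foldl pvIncr d := by
  have h1 : (PySem.List.pyRange 1 p 1).foldl
        (fun counts b => if b = d2 then counts else counts.modify (pvG p d1 d2 a b) 0 (· + 1)) d
      = (PySem.List.pyRange 1 p 1).foldl
        (fun counts b => if ¬ (b = d2) then counts.modify (pvG p d1 d2 a b) 0 (· + 1) else counts) d := by
    apply PySem.List.foldl_congr_mem
    intro acc x _
    by_cases h : x = d2 <;> simp [h]
  rw [h1, PySem.List.foldl_ite_eq_foldl_filter]
  have h2 : (PySem.List.pyRange 1 p 1).filter (fun b => decide ¬(b = d2)) = pvV p d2 := by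
    unfold pvV
    apply List.filter_congr
    intro b _
    by_cases h : b = d2 <;> simp [h]
  rw [h2, List.foldl_map]
  rfl

lemma pv_inner_eq (p d1 d2 a : Int) (hp : 1 < p) (ha1 : 1 ≤ a) (ha2 : a < p)
    (d : PySem.Dict Int Int) :
    (PySem.List.pyRange 1 p 1).foldl
        (fun counts b => if b = d2 then counts else counts.modify (pvG p d1 d2 a b) 0 (· + 1)) d
      = ((pvStops p d1 d2 a ++ [p]).foldl (pvStep p d1 d2 a) (d, 0)).1 := by
  rw [pv_stepA_shape, pv_walk, pv_emit_main p d1 d2 a hp ha1 ha2]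

-- ===== VERDICT (by name: the statement is the Claim_ definition above) =====
theorem brute_force_collision_counts_term9_spec : Claim_equal_brute_force_collision_counts_term9 := by
  intro p d1 d2 _
  unfold Spec_brute_force_collision_counts_term9
  unfold brute_force_collision_counts_term9 brute_force_collision_counts_term9_alt
  refine congrArg PySem.Dict.items ?_
  apply PySem.List.foldl_congr_mem
  intro acc a ha
  rw [PySem.List.mem_pyRange_one] at ha
  by_cases had : a = d1
  · simp only [if_pos had]
  · simp only [if_neg had]
    exact pv_inner_eq p d1 d2 a (by omega) ha.1 ha.2 acc
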